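-- pv_equiv track=rewrite | github.com/hjs0522/Algorithm | 이차원배열과연산.py | calc
-- ===== SOURCE A (Python) =====
-- def calc(board,dir):
--     new_board,length = [],0
--     for row in board:
--         num_cnt,new_row = [],[]
--         for num in set(row):
--             if num == 0:
--                 continue
--             cnt = row.count(num)
--             num_cnt.append((num,cnt))
--         num_cnt = sorted(num_cnt,key=lambda x: [x[1],x[0]])
--         for num,cnt in num_cnt:
--             new_row += [num,cnt]
--         new_board.append(new_row)
--         length = max(length,len(new_row))
--
--     for row in new_board:
--         row+=[0]*(length-len(row))
--         if len(row) > 100: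
--             row = row[:100]
--     return list(zip(*new_board)) if dir == 'C' else new_board
-- ===== SOURCE B (Python) =====
-- def calc(board, dir):
--     # Per row: sort the nonzero entries, then run-length encode them in one
--     # linear pass (instead of set(row) + a repeated row.count scan per value).
--     rows = []
--     for row in board:
--         nz = sorted(x for x in row if x != 0)
--         pairs = []
--         i, n = 0, len(nz)
--         while i < n:
--             j = i
--             while j < n and nz[j] == nz[i]:
--                 j += 1
--             pairs.append((nz[i], j - i))
--             i = j
--         pairs.sort(key=lambda p: (p[1], p[0]))
--         rows.append([v for p in pairs for v in p])
--     length = max((len(r) for r in rows), default=0)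
--     padded = [r + [0] * (length - len(r)) for r in rows]
--     return list(zip(*padded)) if dir == 'C' else padded
-- ===== Notes on version B (the rewrite author's own statement) =====
-- stated objective: faster
-- what changed: Per row, B sorts the nonzero entries and run-length encodes the sorted run in one linear pass to get the (value,count) pairs, instead of A's set(row) plus one full row.count scan per distinct value; the padding/transpose frame is kept.
import Mathlib
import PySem

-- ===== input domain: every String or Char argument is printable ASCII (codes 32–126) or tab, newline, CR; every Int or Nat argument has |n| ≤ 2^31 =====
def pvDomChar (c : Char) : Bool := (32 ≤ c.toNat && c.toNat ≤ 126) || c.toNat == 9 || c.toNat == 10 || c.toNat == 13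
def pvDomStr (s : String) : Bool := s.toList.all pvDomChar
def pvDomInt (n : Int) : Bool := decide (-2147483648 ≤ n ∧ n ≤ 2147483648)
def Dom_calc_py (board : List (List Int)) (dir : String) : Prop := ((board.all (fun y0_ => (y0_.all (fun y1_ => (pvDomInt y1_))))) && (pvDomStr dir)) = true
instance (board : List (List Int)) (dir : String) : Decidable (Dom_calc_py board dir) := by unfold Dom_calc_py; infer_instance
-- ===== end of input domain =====

-- B replaces A's per-row set(row) + one row.count scan per distinct value by sort-the-nonzeros +
-- one-pass run-length encoding (faster); padding/transpose frame unchanged; same result.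
-- shared helper: Python's list(zip(*rows)) on int rows (tuples rendered as lists)
def pyZipStar (rows : List (List Int)) : List (List Int) :=
  match rows with
  | [] => []
  | r :: rs =>
    (List.range (rs.foldl (fun m t => min m t.length) r.length)).map
      (fun i => (r :: rs).map (fun t => t.getD i 0))

-- ===== PORT A =====
def calc_py (board : List (List Int)) (dir : String) : List (List Int) :=
  let st := board.foldl (fun (st : List (List Int) × Int) row =>
      let num_cnt : List (Int × Int) := (PySem.Set.ofList row).foldl
        (fun acc num => if num == 0 then acc else acc ++ [(num, (row.count num : Int))]) []
      let num_cnt := PySem.List.sorted2 num_cnt (fun p => p.2) (fun p => p.1)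
      let new_row := num_cnt.foldl (fun acc p => acc ++ [p.1, p.2]) []
      (st.1 ++ [new_row], max st.2 (new_row.length : Int)))
    ([], 0)
  -- second loop: row += [0]*(length-len(row)); the 'row = row[:100]' rebinding has no effect
  let new_board := st.1.map (fun row => row ++ PySem.List.pyRepeat [0] (st.2 - (row.length : Int)))
  if dir == "C" then pyZipStar new_board else new_board

-- ===== PORT B =====
-- Source B's inner while loops: scan the current run of equal values (count in c), emit (value, run length)
def rleRun (v : Int) (c : Int) : List Int → List (Int × Int)
  | [] => [(v, c)]
  | x :: xs => if x == v then rleRun v (c + 1) xs else (v, c) :: rleRun x 1 xs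

def rle : List Int → List (Int × Int)
  | [] => []
  | x :: xs => rleRun x 1 xs

def calcAltRow (row : List Int) : List Int :=
  let nz := PySem.List.sorted (row.filter (fun x => x != 0)) (fun x => x)
  let pairs := PySem.List.sorted2 (rle nz) (fun p => p.2) (fun p => p.1)
  pairs.flatMap (fun p => [p.1, p.2])

def calc_py_alt (board : List (List Int)) (dir : String) : List (List Int) :=
  let rows := board.map calcAltRow
  let length := PySem.List.maxD (rows.map (fun r => (r.length : Int))) (fun x => x) 0
  let padded := rows.map (fun r => r ++ PySem.List.pyRepeat [0] (length - (r.length : Int)))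
  if dir == "C" then pyZipStar padded else padded

-- ===== PRECONDITION & SPEC =====
def Spec_calc_py (board : List (List Int)) (dir : String) (out : List (List Int)) : Prop := out = calc_py_alt board dir
instance (board : List (List Int)) (dir : String) (out : List (List Int)) : Decidable (Spec_calc_py board dir out) := by unfold Spec_calc_py; infer_instance

-- ===== CLAIM (what is proved, stated in full; the proofs are below) =====
def Claim_equal_calc_py : Prop := ∀ (board : List (List Int)) (dir : String), Dom_calc_py board dir → Spec_calc_py board dir (calc_py board dir)

-- ===== LEMMAS AND PROOFS =====

-- run-length encoding of the remaining (sorted, all ≥ v) tail, with the current run of v already counted c times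
lemma rleRun_spec (t : List Int) : ∀ (v c : Int), t.Pairwise (· ≤ ·) → (∀ y ∈ t, v ≤ y) →
    rleRun v c t = (v, c + (t.count v : Int)) ::
      ((PySem.Set.ofList t).discard v).map (fun w => (w, (t.count w : Int))) := by
  induction t with
  | nil => intro v c _ _; simp [rleRun, PySem.Set.ofList_nil, PySem.Set.discard]
  | cons x t' ih =>
    intro v c hp hv
    rw [List.pairwise_cons] at hp
    by_cases hx : x = v
    · subst hx
      have h1 : rleRun x c (x :: t') = rleRun x (c + 1) t' := by simp [rleRun]
      rw [h1, ih x (c + 1) hp.2 hp.1]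
      have hd : (PySem.Set.ofList (x :: t')).discard x = (PySem.Set.ofList t').discard x := by
        rw [PySem.Set.ofList_cons]
        simp [PySem.Set.discard, List.filter_filter]
      rw [hd, List.count_cons_self]
      congr 1
      · simp [Prod.ext_iff]; ring
      · apply List.map_congr_left
        intro w hw
        have hwne : w ≠ x := ((PySem.Set.mem_discard _ _ _).mp hw).2
        simp [Ne.symm hwne]
    · have hvx : v < x := lt_of_le_of_ne (hv x (List.mem_cons_self)) (fun h => hx h.symm)
      have hvnot : v ∉ x :: t' := by
        intro hmem
        rcases List.mem_cons.mp hmem with h | h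
        · exact hx h.symm
        · exact absurd (hp.1 v h) (by omega)
      have h1 : rleRun v c (x :: t') = (v, c) :: rleRun x 1 t' := by
        simp [rleRun, hx]
      rw [h1, ih x 1 hp.2 hp.1]
      have hc0 : (x :: t').count v = 0 := List.count_eq_zero.mpr hvnot
      have hd : (PySem.Set.ofList (x :: t')).discard v = PySem.Set.ofList (x :: t') := by
        apply List.filter_eq_self.mpr
        intro a ha
        have : a ≠ v := by
          intro h; subst h; exact hvnot ((PySem.Set.mem_ofList _ _).mp ha)
        simpa using this
      rw [hc0, hd, PySem.Set.ofList_cons]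
      simp only [List.map_cons, List.count_cons_self]
      congr 1
      · simp
      congr 1
      · simp [Prod.ext_iff]; ring
      · apply List.map_congr_left
        intro w hw
        have hwne : w ≠ x := ((PySem.Set.mem_discard _ _ _).mp hw).2
        simp [Ne.symm hwne]

-- rle of a sorted list = (distinct values, multiplicity) pairs
lemma rle_spec (l : List Int) (h : l.Pairwise (· ≤ ·)) :
    rle l = (PySem.Set.ofList l).map (fun v => (v, (l.count v : Int))) := by
  cases l with
  | nil => simp [rle, PySem.Set.ofList_nil]
  | cons x t =>
    rw [List.pairwise_cons] at h
    show rleRun x 1 t = _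
    rw [rleRun_spec t x 1 h.2 h.1, PySem.Set.ofList_cons]
    simp only [List.map_cons, List.count_cons_self]
    congr 1
    · simp [Prod.ext_iff]; ring
    · apply List.map_congr_left
      intro w hw
      have hwne : w ≠ x := ((PySem.Set.mem_discard _ _ _).mp hw).2
      simp [Ne.symm hwne]

-- Python's two-key sort is the one-key sort under the lexicographic key
lemma sorted2_eq_sorted_toLex (xs : List (Int × Int)) :
    PySem.List.sorted2 xs (fun p => p.2) (fun p => p.1)
      = PySem.List.sorted xs (fun p => toLex (p.2, p.1)) := by
  show List.foldl _ [] xs = List.foldl _ [] xs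
  congr 1
  funext acc x
  congr 1
  funext a b
  show (decide (a.2 < b.2) || (!decide (b.2 < a.2) && decide (a.1 < b.1)))
      = decide (toLex (a.2, a.1) < toLex (b.2, b.1))
  rcases lt_trichotomy a.2 b.2 with h | h | h
  · simp [Prod.Lex.lt_iff, h, asymm h]
  · simp [Prod.Lex.lt_iff, h]
  · simp [Prod.Lex.lt_iff, asymm h, h.ne']
    omega

lemma toLexSwap_inj : Function.Injective (fun p : Int × Int => toLex (p.2, p.1)) := by
  intro a b h
  have := toLex.injective h
  exact Prod.ext (congrArg Prod.snd this) (congrArg Prod.fst this)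

-- A's per-row encoding equals B's per-row encoding
lemma rowEq (row : List Int) :
    (PySem.List.sorted2 ((PySem.Set.ofList row).foldl
        (fun acc num => if num == 0 then acc else acc ++ [(num, (row.count num : Int))]) [])
      (fun p => p.2) (fun p => p.1)).foldl (fun acc p => acc ++ [p.1, p.2]) []
    = calcAltRow row := by
  unfold calcAltRow
  have hA : (PySem.Set.ofList row).foldl
      (fun acc num => if num == 0 then acc else acc ++ [(num, (row.count num : Int))]) []
      = ((PySem.Set.ofList row).filter (fun v => v != 0)).map
          (fun v => (v, (row.count v : Int))) := by
    rw [PySem.List.foldl_congr_mem (PySem.Set.ofList row)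
        (fun acc num => if num == 0 then acc else acc ++ [(num, (row.count num : Int))])
        (fun acc num => if (num != 0) then acc ++ [(num, (row.count num : Int))] else acc)
        ([] : List (Int × Int))
        (by intro acc x _; by_cases h : x = 0 <;> simp [h])]
    rw [PySem.List.foldl_append_if]
    simp
  set nz := row.filter (fun x => x != 0) with hnz
  set l := PySem.List.sorted nz (fun x => x) with hl
  have hB : rle l = (PySem.Set.ofList l).map (fun v => (v, (row.count v : Int))) := by
    rw [rle_spec l (PySem.List.sorted_pairwise nz (fun x => x))]
    apply List.map_congr_left
    intro v hv
    have hvl : v ∈ l := (PySem.Set.mem_ofList _ _).mp hv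
    have hvnz : v ∈ nz := (PySem.List.sorted_perm nz (fun x => x) false).mem_iff.mp hvl
    have hcl : l.count v = nz.count v := (PySem.List.sorted_perm nz (fun x => x) false).count_eq v
    have hv0 : (v != 0) = true := (List.mem_filter.mp hvnz).2
    have hcnz : nz.count v = row.count v := List.count_filter hv0
    rw [hcl, hcnz]
  -- the two pair lists are permutations of each other with no order information needed
  have hperm : ((PySem.Set.ofList row).filter (fun v => v != 0)).map
        (fun v => (v, (row.count v : Int))) |>.Perm (rle l) := by
    rw [hB]
    apply List.Perm.map
    apply (List.perm_ext_iff_of_nodup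
      ((PySem.Set.nodup_ofList row).filter _) (PySem.Set.nodup_ofList l)).mpr
    intro v
    rw [List.mem_filter, PySem.Set.mem_ofList, PySem.Set.mem_ofList,
        (PySem.List.sorted_perm nz (fun x => x) false).mem_iff, hnz, List.mem_filter]
  have hsort : PySem.List.sorted2 (((PySem.Set.ofList row).filter (fun v => v != 0)).map
        (fun v => (v, (row.count v : Int)))) (fun p => p.2) (fun p => p.1)
      = PySem.List.sorted2 (rle l) (fun p => p.2) (fun p => p.1) := by
    rw [sorted2_eq_sorted_toLex, sorted2_eq_sorted_toLex]
    exact PySem.List.sorted_eq_sorted_of_perm _ _ _ toLexSwap_inj hperm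
  rw [hA, hsort, PySem.List.foldl_append_eq_flatMap]
  simp

-- max((len(r) for r in rows), default=0) is the running-max loop when all elements are ≥ 0
lemma maxD_eq_foldl (xs : List Int) (h : ∀ x ∈ xs, 0 ≤ x) :
    PySem.List.maxD xs (fun y => y) 0 = xs.foldl (fun m x => max m x) 0 := by
  cases xs with
  | nil => rfl
  | cons x t =>
    have hx : max (0 : Int) x = x := max_eq_right (h x (by simp))
    simp [PySem.List.maxD, PySem.List.max?_id_cons, List.foldl_cons, hx]

-- A's accumulating fold is the map of rows paired with the running max of their lengths
lemma foldA (board : List (List Int)) :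
    board.foldl (fun (st : List (List Int) × Int) row =>
        (st.1 ++ [calcAltRow row], max st.2 ((calcAltRow row).length : Int))) ([], 0)
    = (board.map calcAltRow,
       PySem.List.maxD ((board.map calcAltRow).map (fun r => (r.length : Int))) (fun x => x) 0) := by
  rw [PySem.List.foldl_prod_mk (f := fun (acc : List (List Int)) row => acc ++ [calcAltRow row])
      (g := fun (m : Int) row => max m ((calcAltRow row).length : Int))]
  rw [PySem.List.foldl_append_singleton_eq_map, List.nil_append]
  rw [maxD_eq_foldl _ (by intro x hx; simp at hx; obtain ⟨r, _, rfl⟩ := hx; positivity)]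
  rw [List.map_map, List.foldl_map]
  simp

-- ===== VERDICT (by name: the statement is the Claim_ definition above) =====
theorem calc_py_spec : Claim_equal_calc_py := by
  unfold Claim_equal_calc_py
  intro board dir _
  unfold Spec_calc_py calc_py calc_py_alt
  simp only [rowEq, foldA]
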